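-- pv_equiv track=rewrite | github.com/harsham4026/DSA | dsa/SegreagteZerosAndOnes.py | segragate_zeros_to_left
-- ===== SOURCE A (Python) =====
-- def segragate_zeros_to_left(arr) :
--     count = 0
--
--     length = len(arr)
--     new_array = [None] * length
--
--     for i in range(length) :
--         if arr[i] == 0 :
--             count += 1
--
--     for i in range(0, count) :
--         new_array[i] = 0
--
--     for i in range(length) :
--         if arr[i] != 0 :
--             new_array[count] = arr[i]
--             count += 1
--
--     return new_array
-- ===== SOURCE B (Python) =====
-- def segragate_zeros_to_left(arr):
--     n = len(arr)
--     new = [0] * n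
--     j = n - 1
--     for i in range(n - 1, -1, -1):
--         if arr[i] != 0:
--             new[j] = arr[i]
--             j -= 1
--     return new
-- ===== Notes on version B (the rewrite author's own statement) =====
-- stated objective: simpler
-- what changed: Replaces A's three passes (count zeros, fill zeros, forward append of non-zeros) by a single reverse scan over a zero-prefilled output with one backward write cursor; the never-written low slots remain 0.
import Mathlib
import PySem

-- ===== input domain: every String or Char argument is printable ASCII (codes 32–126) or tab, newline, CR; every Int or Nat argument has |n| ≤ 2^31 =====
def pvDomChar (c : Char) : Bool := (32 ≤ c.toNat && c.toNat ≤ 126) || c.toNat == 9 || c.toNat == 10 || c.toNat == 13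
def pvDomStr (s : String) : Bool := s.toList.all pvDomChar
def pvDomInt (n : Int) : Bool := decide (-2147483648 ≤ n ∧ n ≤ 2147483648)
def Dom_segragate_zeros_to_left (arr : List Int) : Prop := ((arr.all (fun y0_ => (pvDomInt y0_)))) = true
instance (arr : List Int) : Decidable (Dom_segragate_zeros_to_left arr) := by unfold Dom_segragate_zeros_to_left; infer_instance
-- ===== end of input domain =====

-- B replaces A's three forward passes (count zeros, fill zeros, append non-zeros) by one
-- reverse scan over a zero-prefilled output with a backward write cursor (same O(n) cost).

-- ===== PORT A =====
-- zero counting pass (A's first loop)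
def pvAZeroCount (arr : List Int) : Nat :=
  arr.foldl (fun c x => if x = 0 then c + 1 else c) 0
-- A's second loop: for i in range(0, count): new_array[i] = 0
def pvAFillZeros (new : List Int) (count : Nat) : List Int :=
  (List.range count).foldl (fun nw i => nw.set i 0) new
-- A's third loop over arr, writing each non-zero at cursor `count` and incrementing it
def pvAPlace (arr : List Int) (st : List Int × Nat) : List Int × Nat :=
  arr.foldl (fun s x => if x ≠ 0 then (s.1.set s.2 x, s.2 + 1) else s) st
-- `[None] * length` is ported as a list of 0-placeholders: every slot of new_array is
-- written (count zeros + the non-zeros fill it exactly), so the placeholder is never returned.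
def segragate_zeros_to_left (arr : List Int) : List Int :=
  let count := pvAZeroCount arr
  let new_array := List.replicate arr.length (0 : Int)
  let new_array := pvAFillZeros new_array count
  (pvAPlace arr (new_array, count)).1

-- ===== PORT B =====
-- B's single loop: `for i in range(n-1, -1, -1)` reading arr[i] is ported as a fold over
-- arr.reverse; the cursor j only ever reaches a write while ≥ 0, so it is carried as a Nat.
def pvBLoop (r : List Int) (st : List Int × Nat) : List Int × Nat :=
  r.foldl (fun s x => if x ≠ 0 then (s.1.set s.2 x, s.2 - 1) else s) st
def segragate_zeros_to_left_alt (arr : List Int) : List Int :=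
  let n := arr.length
  (pvBLoop arr.reverse (List.replicate n (0 : Int), n - 1)).1

-- ===== PRECONDITION & SPEC =====
def Spec_segragate_zeros_to_left (arr : List Int) (out : List Int) : Prop := out = segragate_zeros_to_left_alt arr
instance (arr : List Int) (out : List Int) : Decidable (Spec_segragate_zeros_to_left arr out) := by unfold Spec_segragate_zeros_to_left; infer_instance

-- ===== CLAIM (what is proved, stated in full; the proofs are below) =====
def Claim_equal_segragate_zeros_to_left : Prop := ∀ (arr : List Int), Dom_segragate_zeros_to_left arr → Spec_segragate_zeros_to_left arr (segragate_zeros_to_left arr)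

-- ===== LEMMAS AND PROOFS =====

theorem pv_place_step (x : Int) (l : List Int) (buf : List Int) (c : Nat) :
    pvAPlace (x :: l) (buf, c)
      = pvAPlace l (if x ≠ 0 then (buf.set c x, c + 1) else (buf, c)) := rfl

theorem pv_bloop_step (x : Int) (r : List Int) (buf : List Int) (j : Nat) :
    pvBLoop (x :: r) (buf, j)
      = pvBLoop r (if x ≠ 0 then (buf.set j x, j - 1) else (buf, j)) := rfl

theorem pv_set_replicate (n i : Nat) :
    (List.replicate n (0 : Int)).set i 0 = List.replicate n 0 := by
  induction n generalizing i with
  | zero => simp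
  | succ m ih =>
    cases i with
    | zero => simp [List.replicate_succ]
    | succ k => simp [List.replicate_succ, ih]

theorem pv_fillZeros_replicate (n c : Nat) :
    pvAFillZeros (List.replicate n (0 : Int)) c = List.replicate n 0 := by
  induction c with
  | zero => simp [pvAFillZeros]
  | succ k ih =>
    simp only [pvAFillZeros, List.range_succ, List.foldl_append, List.foldl_cons,
      List.foldl_nil] at *
    rw [ih, pv_set_replicate]

theorem pv_zeroCount_eq (arr : List Int) :
    pvAZeroCount arr = (arr.filter (fun x => x == 0)).length := by
  have h : ∀ (l : List Int) (c : Nat),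
      l.foldl (fun c x => if x = 0 then c + 1 else c) c
        = c + (l.filter (fun x => x == 0)).length := by
    intro l
    induction l with
    | nil => simp
    | cons x l ih =>
      intro c
      by_cases hx : x = 0 <;> simp [hx, ih, List.filter_cons] <;> omega
  simpa [pvAZeroCount] using h arr 0

theorem pv_filter_lengths (arr : List Int) :
    (arr.filter (fun x => x == 0)).length + (arr.filter (fun x => !(x == 0))).length
      = arr.length := by
  induction arr with
  | nil => simp
  | cons x l ih =>
    by_cases hx : x = 0 <;> simp [List.filter_cons, hx] <;> omega

theorem pv_place_spec (l : List Int) :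
    ∀ (pre suf : List Int), (l.filter (fun x => !(x == 0))).length ≤ suf.length →
      pvAPlace l (pre ++ suf, pre.length)
        = (pre ++ l.filter (fun x => !(x == 0))
             ++ suf.drop (l.filter (fun x => !(x == 0))).length,
           pre.length + (l.filter (fun x => !(x == 0))).length) := by
  induction l with
  | nil => intro pre suf h; simp [pvAPlace]
  | cons x l ih =>
    intro pre suf h
    by_cases hx : x = 0
    · have hfc : (x :: l).filter (fun x => !(x == 0)) = l.filter (fun x => !(x == 0)) := by
        rw [List.filter_cons, if_neg (by simp [hx])]
      rw [hfc] at h ⊢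
      rw [pv_place_step, if_neg (by simp [hx])]
      exact ih pre suf h
    · have hfc : (x :: l).filter (fun x => !(x == 0))
          = x :: l.filter (fun x => !(x == 0)) := by
        rw [List.filter_cons, if_pos (by simp [hx])]
      rcases suf with _ | ⟨s, suf'⟩
      · rw [hfc] at h; simp at h
      · have h' : (l.filter (fun x => !(x == 0))).length ≤ suf'.length := by
          rw [hfc] at h; simp only [List.length_cons] at h; omega
        have hset : (pre ++ s :: suf').set pre.length x = (pre ++ [x]) ++ suf' := by
          rw [List.set_append_right _ _ (le_refl _)]
          simp
        rw [pv_place_step, if_pos hx, hset]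
        have hrec := ih (pre ++ [x]) suf' h'
        rw [show (pre ++ [x]).length = pre.length + 1 from by simp] at hrec
        rw [hrec, hfc]
        simp only [Prod.mk.injEq, List.length_cons, List.drop_succ_cons]
        constructor
        · simp
        · omega

theorem pv_bloop_spec (r : List Int) :
    ∀ (pre suf : List Int), (r.filter (fun x => !(x == 0))).length ≤ pre.length →
      (pvBLoop r (pre ++ suf, pre.length - 1)).1
        = pre.take (pre.length - (r.filter (fun x => !(x == 0))).length)
            ++ (r.filter (fun x => !(x == 0))).reverse ++ suf := by
  induction r with
  | nil => intro pre suf h; simp [pvBLoop]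
  | cons x r ih =>
    intro pre suf h
    by_cases hx : x = 0
    · have hfc : (x :: r).filter (fun x => !(x == 0)) = r.filter (fun x => !(x == 0)) := by
        rw [List.filter_cons, if_neg (by simp [hx])]
      rw [hfc] at h ⊢
      rw [pv_bloop_step, if_neg (by simp [hx])]
      exact ih pre suf h
    · have hfc : (x :: r).filter (fun x => !(x == 0))
          = x :: r.filter (fun x => !(x == 0)) := by
        rw [List.filter_cons, if_pos (by simp [hx])]
      rcases pre.eq_nil_or_concat with rfl | ⟨pre', p, hpre⟩
      · rw [hfc] at h; simp at h
      · subst hpre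
        simp only [List.concat_eq_append] at h ⊢
        have hlen : (pre' ++ [p]).length = pre'.length + 1 := by simp
        have hk : (r.filter (fun x => !(x == 0))).length ≤ pre'.length := by
          rw [hfc, hlen] at h; simp only [List.length_cons] at h; omega
        have hset : ((pre' ++ [p]) ++ suf).set ((pre' ++ [p]).length - 1) x
            = pre' ++ (x :: suf) := by
          rw [hlen]
          simp only [Nat.add_sub_cancel, List.append_assoc]
          rw [List.set_append_right _ _ (le_refl _)]
          simp
        have hj : (pre' ++ [p]).length - 1 - 1 = pre'.length - 1 := by
          rw [hlen]
          omega
        rw [pv_bloop_step, if_pos hx, hset, hj]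
        rw [ih pre' (x :: suf) hk, hfc]
        simp only [hlen, List.reverse_cons, List.length_cons]
        rw [show pre'.length + 1 - ((r.filter (fun x => !(x == 0))).length + 1)
              = pre'.length - (r.filter (fun x => !(x == 0))).length from by omega]
        rw [List.take_append_of_le_length (by omega)]
        simp

-- ===== VERDICT (by name: the statement is the Claim_ definition above) =====
theorem segragate_zeros_to_left_spec : Claim_equal_segragate_zeros_to_left := by
  intro arr _
  unfold Spec_segragate_zeros_to_left segragate_zeros_to_left segragate_zeros_to_left_alt
  set z := (arr.filter (fun x => x == 0)).length with hz
  set f := arr.filter (fun x => !(x == 0)) with hf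
  have hzf : z + f.length = arr.length := pv_filter_lengths arr
  have hA : (pvAPlace arr (List.replicate arr.length (0 : Int), z)).1
      = List.replicate z (0 : Int) ++ f := by
    have hsplit : List.replicate arr.length (0 : Int)
        = List.replicate z (0 : Int) ++ List.replicate f.length (0 : Int) := by
      rw [List.replicate_append_replicate, hzf]
    have hple := pv_place_spec arr (List.replicate z (0 : Int))
      (List.replicate f.length (0 : Int)) (by simp [hf])
    rw [hsplit]
    rw [show (List.replicate z (0 : Int)).length = z from by simp] at hple
    rw [hple]
    simp [hf]
  have hB : (pvBLoop arr.reverse (List.replicate arr.length (0 : Int), arr.length - 1)).1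
      = List.replicate z (0 : Int) ++ f := by
    have hrf : arr.reverse.filter (fun x => !(x == 0)) = f.reverse := by
      rw [hf, List.filter_reverse]
    have hbl := pv_bloop_spec arr.reverse (List.replicate arr.length (0 : Int)) []
      (by rw [hrf]; simp; omega)
    rw [hrf] at hbl
    simp only [List.length_replicate, List.length_reverse, List.reverse_reverse,
      List.append_nil, List.take_replicate] at hbl
    rw [show min (arr.length - f.length) arr.length = z from by omega] at hbl
    exact hbl
  simp only [pv_zeroCount_eq, ← hz, pv_fillZeros_replicate, hA, hB]
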